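-- pv_equiv track=rewrite | github.com/PeterBeattie19/Kattis | FallingApples.py | solve
-- ===== SOURCE A (Python) =====
-- def solve(grid, r, c):
--     if r >= len(grid)-1:
--         return grid
--
--     elif grid[r+1][c] == '#':
--         return solve(grid, r+2, c)
--
--     elif grid[r][c] == '.' or grid[r][c] == '#':
--         return solve(grid, r+1, c)
--
--     if grid[r+1][c] == 'a':
--         grid = solve(grid, r+1, c)
--
--     if grid[r+1][c] == 'a':
--         return grid
--
--     if grid[r+1][c] == '.':
--         grid[r][c] = '.'
--         grid[r+1][c] = 'a'
--         return solve(grid, r+1, c)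
-- ===== SOURCE B (Python) =====
-- def solve(grid, r, c):
--     # Return-value equivalent to A; like A, mutates grid's rows in place (column c, rows >= r).
--     if r >= len(grid) - 1:
--         return grid
--     col = [row[c] for row in grid[r:]]
--     out = []
--     seg = []
--     for cell in col:
--         if cell == '#':
--             apples = seg.count('a')
--             out += ['.'] * (len(seg) - apples) + ['a'] * apples + ['#']
--             seg = []
--         else:
--             seg.append(cell)
--     apples = seg.count('a')
--     out += ['.'] * (len(seg) - apples) + ['a'] * apples
--     for i, cell in enumerate(out):
--         grid[r + i][c] = cell
--     return grid
-- ===== Notes on version B (the rewrite author's own statement) =====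
-- stated objective: alternative
-- what changed: A settles each apple one cell at a time by recursion (re-settling the pile below it at every step); B makes one pass over the column, splitting it at '#' into segments, counts the apples of each segment and writes them back at the segment's bottom.
-- outside the precondition, e.g. on solve([['x'], ['#'], ['.']], 0, 0): A returns [['x'], ['#'], ['.']], B returns [['.'], ['#'], ['.']]; on solve([['a'], ['.']], -1, 0): A returns [['.'], ['a']], B returns [['a'], ['.']]; on solve([['a'], ['x'], ['.']], 0, 0): A returns None, B returns [['.'], ['.'], ['a']]
import Mathlib
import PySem

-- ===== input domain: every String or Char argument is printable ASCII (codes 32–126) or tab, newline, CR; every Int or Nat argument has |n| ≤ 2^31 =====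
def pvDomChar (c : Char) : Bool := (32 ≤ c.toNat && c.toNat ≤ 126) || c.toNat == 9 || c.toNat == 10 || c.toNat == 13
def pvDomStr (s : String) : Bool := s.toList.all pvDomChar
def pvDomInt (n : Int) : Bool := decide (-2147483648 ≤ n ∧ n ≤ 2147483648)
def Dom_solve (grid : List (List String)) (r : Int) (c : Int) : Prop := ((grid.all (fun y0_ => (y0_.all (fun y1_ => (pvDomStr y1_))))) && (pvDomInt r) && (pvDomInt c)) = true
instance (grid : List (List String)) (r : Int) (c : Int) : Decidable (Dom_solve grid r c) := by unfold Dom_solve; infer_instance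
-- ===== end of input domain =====

-- B replaces A's cell-by-cell recursive settling by a single pass per column (count apples
-- per '#'-delimited segment, write them back at the segment bottom); like A, B mutates the
-- rows of `grid` in place — the theorems below are about the returned value.

-- ===== PORT A =====
-- A's recursion terminates because the row index grows; the fuel `(len(grid) - r) + 1`
-- strictly exceeds the recursion depth on every input A returns on, so it never runs out there.
def solveFuel : Nat → List (List String) → Int → Int → Option (List (List String))
  | 0, _, _, _ => none
  | f+1, grid, r, c =>
    if r ≥ (grid.length : Int) - 1 then some grid
    else
      (PySem.List.pyGet? grid (r+1)).bind (fun row1 =>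
      (PySem.List.pyGet? row1 c).bind (fun v1 =>
      if v1 = "#" then solveFuel f grid (r+2) c
      else
        (PySem.List.pyGet? grid r).bind (fun row0 =>
        (PySem.List.pyGet? row0 c).bind (fun v0 =>
        if v0 = "." ∨ v0 = "#" then solveFuel f grid (r+1) c
        else
          -- Python: if grid[r+1][c]=='a', first settle the pile below (rebinding grid);
          -- a None result would make the re-read raise TypeError (the none case).
          (if v1 = "a" then solveFuel f grid (r+1) c else some grid).bind (fun g2 =>
          (PySem.List.pyGet? g2 (r+1)).bind (fun row1' =>
          (PySem.List.pyGet? row1' c).bind (fun w1 =>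
          if w1 = "a" then some g2
          else if w1 = "." then
            (PySem.List.pyGet? g2 r).bind (fun row0' =>
            (PySem.List.pySet? row0' c ".").bind (fun row0'' =>
            (PySem.List.pySet? row1' c "a").bind (fun row1'' =>
            solveFuel f (PySem.List.pySetD (PySem.List.pySetD g2 r row0'') (r+1) row1'') (r+1) c)))
          else none)))))))   -- Python falls through all ifs: returns None

def solve (grid : List (List String)) (r : Int) (c : Int) : List (List String) :=
  (solveFuel (((grid.length : Int) - r).toNat + 1) grid r c).getD []

-- ===== PORT B =====
def solve_alt (grid : List (List String)) (r : Int) (c : Int) : List (List String) :=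
  if r ≥ (grid.length : Int) - 1 then grid
  else
    let col := (PySem.List.slice grid (some r) none).map (fun row => PySem.List.pyGetD row c "")
    let p := col.foldl (fun (acc : List String × List String) cell =>
        if cell = "#" then
          (acc.1 ++ List.replicate (acc.2.length - acc.2.count "a") "."
                 ++ List.replicate (acc.2.count "a") "a" ++ ["#"], [])
        else (acc.1, acc.2 ++ [cell])) ([], [])
    let out := p.1 ++ List.replicate (p.2.length - p.2.count "a") "."
                   ++ List.replicate (p.2.count "a") "a"
    (PySem.List.enumerate out 0).foldl (fun g q =>
        PySem.List.pySetD g (r + q.1) (PySem.List.pySetD (PySem.List.pyGetD g (r + q.1) []) c q.2)) grid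

-- ===== PRECONDITION & SPEC =====
-- Pre_ excludes inputs where A raises (c or an intermediate row index out of range), where A
-- returns None instead of a grid (an 'a' sitting on a cell other than '.', '#', 'a'), and the
-- negative-index inputs where Python's wraparound makes A scan an unintended region of the grid.
def Pre_solve (grid : List (List String)) (r : Int) (c : Int) : Prop :=
  r ≥ (grid.length : Int) - 1 ∨
    (0 ≤ r ∧ 0 ≤ c ∧ ∀ row ∈ grid.drop r.toNat,
      c < (row.length : Int) ∧
        (row.getD c.toNat "" = "." ∨ row.getD c.toNat "" = "#" ∨ row.getD c.toNat "" = "a"))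
instance (grid : List (List String)) (r : Int) (c : Int) : Decidable (Pre_solve grid r c) := by
  unfold Pre_solve; infer_instance

def pvWitness_solve : List (List String) × Int × Int := ([["a"], ["."], ["#"], ["a"], ["."]], 0, 0)

def Spec_solve (grid : List (List String)) (r : Int) (c : Int) (out : List (List String)) : Prop := out = solve_alt grid r c
instance (grid : List (List String)) (r : Int) (c : Int) (out : List (List String)) : Decidable (Spec_solve grid r c out) := by unfold Spec_solve; infer_instance

-- ===== CLAIM (what is proved, stated in full; the proofs are below) =====
def Claim_equal_solve : Prop := ∀ (grid : List (List String)) (r : Int) (c : Int), Dom_solve grid r c → Pre_solve grid r c → Spec_solve grid r c (solve grid r c)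

-- ===== LEMMAS AND PROOFS =====

-- ---- column-level objects ----
-- pk: the settled form of one '#'-free segment: dots first, the apples at its bottom.
def pk (s : List String) : List String :=
  List.replicate (s.length - s.count "a") "." ++ List.replicate (s.count "a") "a"

-- stB: B's segment pass, written as structural recursion (seg = the open segment).
def stB : List String → List String → List String
  | seg, [] => pk seg
  | seg, x :: xs => if x = "#" then pk seg ++ "#" :: stB [] xs else stB (seg ++ [x]) xs

-- tail part of the closed form of stB
def tp : List String → List String
  | [] => []
  | h :: t => h :: stB [] t

def okv (v : String) : Prop := v = "." ∨ v = "#" ∨ v = "a"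

-- ---- grid-level objects ----
def setC (g : List (List String)) (i cn : Nat) (v : String) : List (List String) :=
  g.set i ((g.getD i []).set cn v)

def wrC : List (List String) → Nat → Nat → List String → List (List String)
  | g, _, _, [] => g
  | g, k, cn, v :: vs => wrC (setC g k cn v) (k+1) cn vs

def cellC (g : List (List String)) (i cn : Nat) : String := (g.getD i []).getD cn ""

def colC (g : List (List String)) (k cn : Nat) : List String :=
  (g.drop k).map (fun row => row.getD cn "")

def GoodC (g : List (List String)) (k cn : Nat) : Prop :=
  ∀ i, k ≤ i → i < g.length → cn < (g.getD i []).length ∧ okv (cellC g i cn)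


def WideC (g : List (List String)) (k cn : Nat) : Prop :=
  ∀ i, k ≤ i → i < g.length → cn < (g.getD i []).length

-- ================= pk lemmas =================
lemma count_le_len (s : List String) : s.count "a" ≤ s.length := List.count_le_length

lemma pk_nil : pk [] = [] := by simp [pk]

lemma pk_length (s : List String) : (pk s).length = s.length := by
  have := count_le_len s
  simp [pk]; omega

lemma pk_mem {s : List String} {x : String} (h : x ∈ pk s) : x = "." ∨ x = "a" := by
  simp [pk] at h
  rcases h with ⟨-, h⟩ | ⟨-, h⟩ <;> simp [h]

lemma pk_cons_dot (s : List String) : pk ("." :: s) = "." :: pk s := by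
  have := count_le_len s
  simp [pk, List.count_cons]
  rw [show s.length + 1 - s.count "a" = (s.length - s.count "a") + 1 by omega]
  simp [List.replicate_succ]

lemma pk_congr {s t : List String} (h1 : s.length = t.length) (h2 : s.count "a" = t.count "a") :
    pk s = pk t := by simp [pk, h1, h2]

lemma pk_pk (s : List String) : pk (pk s) = pk s := by
  have := count_le_len s
  apply pk_congr
  · exact pk_length s
  · simp [pk, List.count_append, List.count_replicate]

lemma pk_no_hash {s : List String} : ∀ x ∈ pk s, x ≠ "#" := by
  intro x hx
  rcases pk_mem hx with h | h <;> simp [h]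

-- ================= stB basic lemmas =================
lemma stB_dot_seg (l : List String) : ∀ seg, stB ("." :: seg) l = "." :: stB seg l := by
  induction l with
  | nil => intro seg; simp [stB, pk_cons_dot]
  | cons x xs ih =>
    intro seg
    by_cases hx : x = "#"
    · simp [stB, hx, pk_cons_dot]
    · simpa [stB, hx] using ih (seg ++ [x])

lemma stB_len (l : List String) : ∀ seg, (stB seg l).length = seg.length + l.length := by
  induction l with
  | nil => intro seg; simp [stB, pk_length]
  | cons x xs ih =>
    intro seg
    by_cases hx : x = "#"
    · simp [stB, hx, pk_length, ih] <;> omega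
    · simp [stB, hx, ih] <;> omega

lemma stB_mem {l : List String} : ∀ {seg x}, x ∈ stB seg l → okv x := by
  induction l with
  | nil => intro seg x h; rcases pk_mem (by simpa [stB] using h) with h | h <;> simp [okv, h]
  | cons y ys ih =>
    intro seg x h
    by_cases hy : y = "#"
    · simp [stB, hy] at h
      rcases h with h | h | h
      · rcases pk_mem h with h | h <;> simp [okv, h]
      · simp [okv, h]
      · exact ih h
    · simp only [stB, hy, if_neg, ite_false] at h
      exact ih (by simpa using h)

lemma stB_cf (l : List String) : ∀ seg,
    stB seg l = pk (seg ++ l.takeWhile (· ≠ "#")) ++ tp (l.dropWhile (· ≠ "#")) := by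
  induction l with
  | nil => intro seg; simp [stB, tp]
  | cons x xs ih =>
    intro seg
    by_cases hx : x = "#"
    · simp [stB, hx, List.takeWhile, List.dropWhile, tp]
    · have hx' : ((x ≠ "#") : Bool) = true := by simp [hx]
      simp only [stB, hx, ite_false, if_neg, List.takeWhile, List.dropWhile, hx', ih (seg ++ [x])]
      simp

lemma tw_app {l1 l2 : List String} (h : ∀ x ∈ l1, x ≠ "#") :
    (l1 ++ l2).takeWhile (· ≠ "#") = l1 ++ l2.takeWhile (· ≠ "#") := by
  rw [List.takeWhile_append]
  rw [List.takeWhile_eq_self_iff.mpr (show ∀ x ∈ l1, (fun x => decide (x ≠ "#")) x = true by intro x hx; simpa using h x hx)]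
  simp

lemma dw_app {l1 l2 : List String} (h : ∀ x ∈ l1, x ≠ "#") :
    (l1 ++ l2).dropWhile (· ≠ "#") = l2.dropWhile (· ≠ "#") := by
  rw [List.dropWhile_append]
  rw [List.dropWhile_eq_nil_iff.2 (by intro x hx; simpa using h x hx)]
  simp

-- head of dropWhile fails the predicate
lemma dropWhile_head_hash {l : List String} {h : String} {t : List String}
    (hd : l.dropWhile (· ≠ "#") = h :: t) : h = "#" := by
  induction l with
  | nil => simp [List.dropWhile] at hd
  | cons x xs ih =>
    by_cases hx : x = "#"
    · rw [List.dropWhile_cons, if_neg (by simp [hx])] at hd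
      have := (List.cons.injEq _ _ _ _).mp hd
      rw [← this.1, hx]
    · rw [List.dropWhile_cons, if_pos (by simp [hx])] at hd
      exact ih hd

def okTail (rp : List String) : Prop := rp = [] ∨ ∃ u, rp = "#" :: stB [] u

lemma okTail_dropWhile (l : List String) : okTail (tp (l.dropWhile (· ≠ "#"))) := by
  rcases hd : l.dropWhile (· ≠ "#") with _ | ⟨h, t⟩
  · left; simp [tp]
  · right; exact ⟨t, by simp [tp, dropWhile_head_hash hd]⟩

lemma stB_idem (u : List String) : stB [] (stB [] u) = stB [] u := by
  induction hn : u.length using Nat.strong_induction_on generalizing u with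
  | _ n ih =>
  subst hn
  rw [stB_cf u []]
  rcases hd : u.dropWhile (· ≠ "#") with _ | ⟨h, u2⟩
  · simp only [hd, tp, List.append_nil, List.nil_append]
    rw [stB_cf _ []]
    rw [List.takeWhile_eq_self_iff.mpr (by intro x hx; simpa using pk_no_hash x hx),
        List.dropWhile_eq_nil_iff.mpr (by intro x hx; simpa using pk_no_hash x hx)]
    simp [tp, pk_pk]
  · have hh : h = "#" := dropWhile_head_hash hd
    subst hh
    simp only [hd, tp, List.nil_append]
    rw [stB_cf _ []]
    rw [tw_app (l2 := "#" :: stB [] u2) pk_no_hash, dw_app (l2 := "#" :: stB [] u2) pk_no_hash]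
    have hlen : u2.length < u.length := by
      have h1 : (u.dropWhile (· ≠ "#")).length ≤ u.length := List.length_dropWhile_le _ _
      rw [hd] at h1; simp at h1; omega
    simp only [List.takeWhile, List.dropWhile]
    simp only [ne_eq, not_true_eq_false, decide_false, Bool.false_eq_true, ite_false, if_neg]
    simp [tp, pk_pk, ih u2.length hlen u2 rfl]

-- dropWhile length fact used above needs: (we inline via List.length_dropWhile_le)

-- ================= the N-lemmas (branch equations of stB) =================
lemma stB_nil : stB [] [] = [] := by simp [stB, pk_nil]

lemma stB_single {v : String} (h : okv v) : stB [] [v] = [v] := by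
  rcases h with h | h | h <;> subst h <;> decide

lemma stB_hash_cons (l : List String) : stB [] ("#" :: l) = "#" :: stB [] l := by
  simp [stB, pk_nil]

lemma stB_dot_cons (l : List String) : stB [] ("." :: l) = "." :: stB [] l := by
  have := stB_dot_seg l []
  simpa [stB] using this

lemma stB_two {v0 : String} (h : okv v0) (t : List String) :
    stB [] (v0 :: "#" :: t) = v0 :: "#" :: stB [] t := by
  rcases h with h | h | h <;> subst h
  · rw [stB_dot_cons, stB_hash_cons]
  · rw [stB_hash_cons, stB_hash_cons]
  · show stB [] ("a" :: "#" :: t) = _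
    simp [stB, pk]

-- decomposition of stB on a non-'#' head
lemma stB_decomp {v1 : String} (t : List String) (h1 : v1 ≠ "#") :
    stB [] (v1 :: t) =
      pk (v1 :: t.takeWhile (· ≠ "#")) ++ tp (t.dropWhile (· ≠ "#")) := by
  rw [stB_cf]
  simp [List.takeWhile, List.dropWhile, h1]

-- compute pk from a count and a length
lemma pk_eq {s : List String} (D M : Nat) (hc : s.count "a" = M) (hl : s.length = D + M) :
    pk s = List.replicate D "." ++ List.replicate M "a" := by
  rw [pk, hc]
  congr 2
  omega

lemma tw_cons {v : String} (t : List String) (h : v ≠ "#") :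
    (v :: t).takeWhile (· ≠ "#") = v :: t.takeWhile (· ≠ "#") := by
  simp [List.takeWhile_cons, h]

lemma dw_cons {v : String} (t : List String) (h : v ≠ "#") :
    (v :: t).dropWhile (· ≠ "#") = t.dropWhile (· ≠ "#") := by
  simp [List.dropWhile_cons, h]

lemma tp_okTail {rp : List String} (h : okTail rp) : tp rp = rp := by
  rcases h with h | ⟨u, h⟩
  · simp [h, tp]
  · simp [h, tp, stB_idem]

-- master decomposition: settling v1::t, and settling it with one more apple on top
lemma stB_a_cons {v1 : String} (t : List String) (h1 : v1 ≠ "#") :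
    ∃ D M rp, okTail rp ∧ 1 ≤ D + M ∧
      stB [] (v1 :: t) = List.replicate D "." ++ List.replicate M "a" ++ rp ∧
      stB [] ("a" :: v1 :: t) = List.replicate D "." ++ List.replicate (M+1) "a" ++ rp := by
  have hcle := count_le_len (v1 :: t.takeWhile (· ≠ "#"))
  refine ⟨(v1 :: t.takeWhile (· ≠ "#")).length - (v1 :: t.takeWhile (· ≠ "#")).count "a",
      (v1 :: t.takeWhile (· ≠ "#")).count "a", tp (t.dropWhile (· ≠ "#")),
      okTail_dropWhile t, by simp; omega, ?_, ?_⟩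
  · rw [stB_decomp t h1,
      pk_eq (s := v1 :: t.takeWhile (· ≠ "#"))
        ((v1 :: t.takeWhile (· ≠ "#")).length - (v1 :: t.takeWhile (· ≠ "#")).count "a")
        ((v1 :: t.takeWhile (· ≠ "#")).count "a") rfl (by omega), List.append_assoc]
  · rw [stB_decomp (v1 :: t) (by simp : ("a" : String) ≠ "#"), tw_cons t h1, dw_cons t h1,
      pk_eq (s := "a" :: v1 :: t.takeWhile (· ≠ "#"))
        ((v1 :: t.takeWhile (· ≠ "#")).length - (v1 :: t.takeWhile (· ≠ "#")).count "a")
        ((v1 :: t.takeWhile (· ≠ "#")).count "a" + 1)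
        (by simp [List.count_cons])
        (by simp only [List.length_cons] at hcle ⊢; omega), List.append_assoc]

-- the shift lemma: one more apple dropped onto an already-settled segment
lemma stB_shift (D M : Nat) {rp : List String} (hrp : okTail rp) :
    stB [] ("a" :: (List.replicate D "." ++ List.replicate M "a" ++ rp)) =
      List.replicate D "." ++ List.replicate (M+1) "a" ++ rp := by
  have hpre : ∀ x ∈ List.replicate D "." ++ List.replicate M "a", x ≠ "#" := by
    intro x hx; simp at hx; rcases hx with ⟨-, h⟩ | ⟨-, h⟩ <;> simp [h]
  have htw : rp.takeWhile (· ≠ "#") = [] := by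
    rcases hrp with h | ⟨u, h⟩ <;> simp [h, List.takeWhile]
  have hdw : rp.dropWhile (· ≠ "#") = rp := by
    rcases hrp with h | ⟨u, h⟩ <;> simp [h, List.dropWhile]
  rw [show List.replicate D "." ++ List.replicate M "a" ++ rp
      = (List.replicate D "." ++ List.replicate M "a") ++ rp by simp]
  rw [stB_decomp _ (by simp), tw_app hpre, dw_app hpre, htw, hdw, tp_okTail hrp]
  rw [List.append_nil]
  rw [pk_eq D (M+1) (by simp [List.count_cons, List.count_append, List.count_replicate])
      (by simp; omega)]

-- N4a: the settled pile below starts with an apple: the apple above cannot move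
lemma stB_a_a {v1 : String} {t t' : List String} (h1 : v1 ≠ "#")
    (h : stB [] (v1 :: t) = "a" :: t') :
    stB [] ("a" :: v1 :: t) = "a" :: "a" :: t' := by
  obtain ⟨D, M, rp, hok, hpos, h1e, h2e⟩ := stB_a_cons t h1
  rw [h1e] at h
  rcases D with _ | D'
  · rcases M with _ | M'
    · simp at hpos
    · rw [List.replicate_succ] at h
      simp at h
      rw [h2e]
      simp [List.replicate_succ, h.symm]
  · rw [List.replicate_succ] at h
    simp at h
  -- done: the succ-D case is impossible since the head would be "."

-- N4b: the settled pile below starts with a gap: the apple falls into it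
lemma stB_a_dot {v1 : String} {t t' : List String} (h1 : v1 ≠ "#")
    (h : stB [] (v1 :: t) = "." :: t') :
    stB [] ("a" :: v1 :: t) = "." :: stB [] ("a" :: t') := by
  obtain ⟨D, M, rp, hok, hpos, h1e, h2e⟩ := stB_a_cons t h1
  rw [h1e] at h
  rcases D with _ | D'
  · rcases M with _ | M'
    · simp at hpos
    · rw [List.replicate_succ] at h
      simp at h
  · rw [List.replicate_succ] at h
    simp at h
    rw [← List.append_assoc] at h
    rw [h2e, ← h, stB_shift D' M hok, List.replicate_succ]
    simp

-- head of a settled non-'#'-headed column is '.' or 'a'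
lemma stB_head {v1 : String} (t : List String) (h1 : v1 ≠ "#") :
    ∃ w1 t', stB [] (v1 :: t) = w1 :: t' ∧ (w1 = "." ∨ w1 = "a") := by
  obtain ⟨D, M, rp, hok, hpos, h1e, -⟩ := stB_a_cons t h1
  rcases D with _ | D'
  · rcases M with _ | M'
    · simp at hpos
    · rw [List.replicate_succ] at h1e
      exact ⟨"a", _, by simpa using h1e, Or.inr rfl⟩
  · rw [List.replicate_succ] at h1e
    exact ⟨".", _, by simpa using h1e, Or.inl rfl⟩

-- N5: an apple above a gap falls one step (nothing settled below yet)
lemma pk_a_dot (s : List String) : pk ("a" :: "." :: s) = "." :: pk ("a" :: s) := by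
  have hc := count_le_len ("a" :: s)
  rw [pk_eq (s := "a" :: "." :: s) (("a" :: s).length - ("a" :: s).count "a" + 1)
        (("a" :: s).count "a") (by simp [List.count_cons])
        (by simp only [List.length_cons] at hc ⊢; omega),
      pk_eq (s := "a" :: s) (("a" :: s).length - ("a" :: s).count "a") (("a" :: s).count "a")
        rfl (by omega)]
  rw [List.replicate_succ]
  simp

lemma stB_a_swap (t : List String) :
    stB [] ("a" :: "." :: t) = "." :: stB [] ("a" :: t) := by
  rw [stB_decomp ("." :: t) (by simp : ("a" : String) ≠ "#"),
      tw_cons t (by simp : ("." : String) ≠ "#"), dw_cons t (by simp : ("." : String) ≠ "#"),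
      stB_decomp t (by simp : ("a" : String) ≠ "#"), pk_a_dot]
  simp

-- ================= grid-level lemmas =================
lemma rowD_set_self {g : List (List String)} {i : Nat} {row : List String} (h : i < g.length) :
    (g.set i row).getD i [] = row := by
  simp [List.getD_eq_getElem?_getD, List.getElem?_set, h]

lemma rowD_set_ne {g : List (List String)} {i j : Nat} {row : List String} (h : i ≠ j) :
    (g.set i row).getD j [] = g.getD j [] := by
  simp [List.getD_eq_getElem?_getD, List.getElem?_set, h]

lemma length_setC (g : List (List String)) (i cn : Nat) (v : String) :
    (setC g i cn v).length = g.length := by simp [setC]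

lemma length_wrC (vs : List String) : ∀ g k cn, (wrC g k cn vs).length = g.length := by
  induction vs with
  | nil => intro g k cn; simp [wrC]
  | cons v vs ih => intro g k cn; simp [wrC, ih, length_setC]

lemma getD_setC_ne {g : List (List String)} {i j cn : Nat} {v : String} (h : i ≠ j) :
    (setC g i cn v).getD j [] = g.getD j [] := by
  unfold setC; exact rowD_set_ne h

lemma getD_setC_self {g : List (List String)} {i cn : Nat} {v : String} (h : i < g.length) :
    (setC g i cn v).getD i [] = (g.getD i []).set cn v := by
  unfold setC; exact rowD_set_self h

lemma setC_setC_same (g : List (List String)) (i cn : Nat) (u v : String) :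
    setC (setC g i cn u) i cn v = setC g i cn v := by
  by_cases h : i < g.length
  · show (setC g i cn u).set i (((setC g i cn u).getD i []).set cn v) = _
    rw [getD_setC_self h, List.set_set]
    show (g.set i ((g.getD i []).set cn u)).set i ((g.getD i []).set cn v) = _
    rw [List.set_set]
    rfl
  · have h1 : setC g i cn u = g := by
      unfold setC
      exact List.set_eq_of_length_le (by omega)
    rw [h1]

lemma setC_comm {g : List (List String)} {i j cn : Nat} {u v : String} (h : i ≠ j) :
    setC (setC g i cn u) j cn v = setC (setC g j cn v) i cn u := by
  show (setC g i cn u).set j (((setC g i cn u).getD j []).set cn v) = _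
  rw [getD_setC_ne h]
  show _ = (setC g j cn v).set i (((setC g j cn v).getD i []).set cn u)
  rw [getD_setC_ne (Ne.symm h)]
  unfold setC
  rw [List.set_comm _ _ h]

lemma wrC_setC_comm (vs : List String) : ∀ g (i k cn : Nat) (v : String), i < k →
    wrC (setC g i cn v) k cn vs = setC (wrC g k cn vs) i cn v := by
  induction vs with
  | nil => intro g i k cn v _; simp [wrC]
  | cons w ws ih =>
    intro g i k cn v hik
    simp only [wrC]
    rw [setC_comm (by omega), ih _ _ _ _ _ (by omega)]

lemma wrC_absorb {vs : List String} (hne : vs ≠ []) (g : List (List String)) (k cn : Nat) (x : String) :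
    wrC (setC g k cn x) k cn vs = wrC g k cn vs := by
  rcases vs with _ | ⟨v, vs⟩
  · simp at hne
  · simp only [wrC, setC_setC_same]

lemma wrC_overwrite (vs : List String) : ∀ us g k cn, us.length = vs.length →
    wrC (wrC g k cn us) k cn vs = wrC g k cn vs := by
  induction vs with
  | nil => intro us g k cn h; simp at h; simp [h, wrC]
  | cons v vs ih =>
    intro us g k cn h
    rcases us with _ | ⟨u, us⟩
    · simp at h
    · simp only [wrC]
      have e1 : wrC (setC g k cn u) (k+1) cn us = setC (wrC g (k+1) cn us) k cn u :=
        wrC_setC_comm us g k (k+1) cn u (by omega)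
      have e2 : wrC (setC (wrC g (k+1) cn us) k cn u) (k+1) cn vs
          = setC (wrC (wrC g (k+1) cn us) (k+1) cn vs) k cn u :=
        wrC_setC_comm vs (wrC g (k+1) cn us) k (k+1) cn u (by omega)
      have e3 : wrC (setC g k cn v) (k+1) cn vs = setC (wrC g (k+1) cn vs) k cn v :=
        wrC_setC_comm vs g k (k+1) cn v (by omega)
      have e4 : wrC (setC (wrC g (k+1) cn us) k cn v) (k+1) cn vs
          = setC (wrC (wrC g (k+1) cn us) (k+1) cn vs) k cn v :=
        wrC_setC_comm vs (wrC g (k+1) cn us) k (k+1) cn v (by omega)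
      rw [e1, setC_setC_same, e4, ih us _ _ _ (by simpa using h), ← e3]

lemma setC_self {g : List (List String)} {k cn : Nat} (hk : k < g.length)
    (hc : cn < (g.getD k []).length) : setC g k cn (cellC g k cn) = g := by
  unfold setC cellC
  rw [List.getD_eq_getElem (g.getD k []) "" hc, List.set_getElem_self,
      List.getD_eq_getElem g [] hk, List.set_getElem_self]

lemma colC_len (g : List (List String)) (k cn : Nat) : (colC g k cn).length = g.length - k := by
  unfold colC
  rw [List.length_map, List.length_drop]

lemma colC_cons {g : List (List String)} {k : Nat} (cn : Nat) (h : k < g.length) :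
    colC g k cn = cellC g k cn :: colC g (k+1) cn := by
  unfold colC cellC
  rw [List.drop_eq_getElem_cons h, List.map_cons, List.getD_eq_getElem g [] h]

lemma colC_nil {g : List (List String)} {k : Nat} (cn : Nat) (h : g.length ≤ k) :
    colC g k cn = [] := by
  unfold colC
  rw [List.drop_eq_nil_of_le h, List.map_nil]

lemma cellC_setC_ne {g : List (List String)} {i j cn : Nat} {v : String} (h : i ≠ j) :
    cellC (setC g i cn v) j cn = cellC g j cn := by
  unfold cellC
  rw [getD_setC_ne h]

lemma cellC_setC_self {g : List (List String)} {i cn : Nat} {v : String} (hi : i < g.length)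
    (hc : cn < (g.getD i []).length) : cellC (setC g i cn v) i cn = v := by
  unfold cellC
  rw [getD_setC_self hi, List.getD_eq_getElem _ "" (by simpa using hc), List.getElem_set]
  simp

lemma cellC_wrC_lt (vs : List String) : ∀ g (i k cn : Nat), i < k →
    cellC (wrC g k cn vs) i cn = cellC g i cn := by
  induction vs with
  | nil => intro g i k cn _; simp [wrC]
  | cons v vs ih =>
    intro g i k cn hik
    simp only [wrC]
    rw [ih _ _ _ _ (by omega), cellC_setC_ne (by omega)]

lemma GoodC_mono {g : List (List String)} {k k' cn : Nat} (h : k ≤ k') (hg : GoodC g k cn) :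
    GoodC g k' cn := by
  intro i hi hlen
  exact hg i (by omega) hlen

lemma GoodC_setC {g : List (List String)} {k j cn : Nat} {v : String} (hv : okv v)
    (hg : GoodC g k cn) : GoodC (setC g j cn v) k cn := by
  intro i hi hlen
  rw [length_setC] at hlen
  by_cases hij : j = i
  · subst hij
    obtain ⟨h1, h2⟩ := hg j hi hlen
    constructor
    · rw [getD_setC_self hlen]
      simpa using h1
    · rw [cellC_setC_self hlen h1]
      exact hv
  · refine ⟨?_, ?_⟩
    · rw [getD_setC_ne hij]
      exact (hg i hi hlen).1
    · rw [cellC_setC_ne hij]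
      exact (hg i hi hlen).2

lemma GoodC_wrC (vs : List String) : ∀ g j k cn, (∀ x ∈ vs, okv x) → GoodC g k cn →
    GoodC (wrC g j cn vs) k cn := by
  induction vs with
  | nil => intro g j k cn _ hg; simpa [wrC] using hg
  | cons v vs ih =>
    intro g j k cn hv hg
    simp only [wrC]
    exact ih _ _ _ _ (fun x hx => hv x (by simp [hx])) (GoodC_setC (hv v (by simp)) hg)

lemma WideC_mono {g : List (List String)} {k k' cn : Nat} (h : k ≤ k') (hg : WideC g k cn) :
    WideC g k' cn := by
  intro i hi hlen
  exact hg i (by omega) hlen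

lemma GoodC_wide {g : List (List String)} {k cn : Nat} (hg : GoodC g k cn) : WideC g k cn :=
  fun i hi hlen => (hg i hi hlen).1

lemma WideC_setC {g : List (List String)} {k j cn : Nat} {v : String}
    (hg : WideC g k cn) : WideC (setC g j cn v) k cn := by
  intro i hi hlen
  rw [length_setC] at hlen
  by_cases hij : j = i
  · subst hij
    rw [getD_setC_self hlen]
    simpa using hg j hi hlen
  · rw [getD_setC_ne hij]
    exact hg i hi hlen

lemma colC_wrC (vs : List String) : ∀ g k cn, WideC g k cn → vs.length = g.length - k →
    colC (wrC g k cn vs) k cn = vs := by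
  induction vs with
  | nil =>
    intro g k cn _ hlen
    simp only [wrC]
    exact colC_nil cn (by simp at hlen; omega)
  | cons v vs ih =>
    intro g k cn hg hlen
    have hk : k < g.length := by simp at hlen; omega
    simp only [wrC]
    rw [colC_cons cn (by rw [length_wrC, length_setC]; omega)]
    congr 1
    · rw [cellC_wrC_lt _ _ _ _ _ (by omega)]
      exact cellC_setC_self hk (hg k Nat.le.refl hk)
    · exact ih _ _ _ (WideC_mono (by omega) (WideC_setC hg))
        (by rw [length_setC]; simp at hlen ⊢; omega)

-- ================= reading cells through PySem =================
lemma pyGet_row {g : List (List String)} {k : Nat} (h : k < g.length) :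
    PySem.List.pyGet? g (k : Int) = some (g.getD k []) := by
  rw [PySem.List.pyGet?_natCast]
  simp [List.getElem?_eq_getElem h, List.getD_eq_getElem _ _ h]

lemma pyGet_cell {row : List String} {cn : Nat} (h : cn < row.length) :
    PySem.List.pyGet? row (cn : Int) = some (row.getD cn "") := by
  rw [PySem.List.pyGet?_natCast]
  simp [List.getElem?_eq_getElem h, List.getD_eq_getElem _ _ h]

-- one-step unfolding of the fuel recursion (rw-safe, unlike simp [solveFuel])
lemma solveFuel_succ (f : Nat) (grid : List (List String)) (r c : Int) :
    solveFuel (f+1) grid r c =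
    (
    if r ≥ (grid.length : Int) - 1 then some grid
    else
      (PySem.List.pyGet? grid (r+1)).bind (fun row1 =>
      (PySem.List.pyGet? row1 c).bind (fun v1 =>
      if v1 = "#" then solveFuel f grid (r+2) c
      else
        (PySem.List.pyGet? grid r).bind (fun row0 =>
        (PySem.List.pyGet? row0 c).bind (fun v0 =>
        if v0 = "." ∨ v0 = "#" then solveFuel f grid (r+1) c
        else
          -- Python: if grid[r+1][c]=='a', first settle the pile below (rebinding grid);
          -- a None result would make the re-read raise TypeError (the none case).
          (if v1 = "a" then solveFuel f grid (r+1) c else some grid).bind (fun g2 =>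
          (PySem.List.pyGet? g2 (r+1)).bind (fun row1' =>
          (PySem.List.pyGet? row1' c).bind (fun w1 =>
          if w1 = "a" then some g2
          else if w1 = "." then
            (PySem.List.pyGet? g2 r).bind (fun row0' =>
            (PySem.List.pySet? row0' c ".").bind (fun row0'' =>
            (PySem.List.pySet? row1' c "a").bind (fun row1'' =>
            solveFuel f (PySem.List.pySetD (PySem.List.pySetD g2 r row0'') (r+1) row1'') (r+1) c)))
          else none)))))))
    ) := rfl

-- ================= more column/grid bridges =================
lemma colC_ext {X Y : List (List String)} {cn : Nat} (hlen : X.length = Y.length) (m : Nat)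
    (h : ∀ i, m ≤ i → i < X.length → cellC X i cn = cellC Y i cn) :
    colC X m cn = colC Y m cn := by
  apply List.ext_getElem
  · rw [colC_len, colC_len, hlen]
  · intro i h1 h2
    rw [colC_len] at h1
    simp only [colC, List.getElem_map, List.getElem_drop]
    have hX : m + i < X.length := by omega
    have := h (m+i) (by omega) hX
    unfold cellC at this
    rw [List.getD_eq_getElem X [] hX, List.getD_eq_getElem Y [] (by omega)] at this
    exact this

lemma colC_setC_lt {g : List (List String)} {j m cn : Nat} {v : String} (h : j < m) :
    colC (setC g j cn v) m cn = colC g m cn :=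
  colC_ext (length_setC g j cn v) m (fun i hi _ => cellC_setC_ne (by omega))

lemma pyGet_cellC {g : List (List String)} {i cn : Nat} (hi : i < g.length)
    (hc : cn < (g.getD i []).length) :
    PySem.List.pyGet? (g.getD i []) (cn : Int) = some (cellC g i cn) := pyGet_cell hc

lemma stB_ne_nil {l : List String} (h : l ≠ []) : stB [] l ≠ [] := by
  intro he
  have := stB_len l []
  rw [he] at this
  simp at this
  exact h (List.eq_nil_of_length_eq_zero this.symm)

-- ================= THE MAIN INDUCTION (port A = settled column, written back) =================
set_option maxHeartbeats 3200000 in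
lemma mainA : ∀ f g (k cn : Nat), GoodC g k cn → g.length ≤ k + f →
    solveFuel (f+1) g (k : Int) (cn : Int) =
      some (wrC g k cn (stB [] (colC g k cn))) := by
  intro f
  induction f with
  | zero =>
    intro g k cn _ hlen
    rw [solveFuel_succ, if_pos (by push_cast; omega), colC_nil cn (by omega), stB_nil]
    rfl
  | succ f ih =>
    intro g k cn hg hlen
    by_cases hbase : (k : Int) ≥ (g.length : Int) - 1
    · rw [solveFuel_succ, if_pos hbase]
      rcases Nat.lt_or_ge k g.length with hk | hk
      · have hcell0 := hg k (by omega) hk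
        rw [colC_cons cn hk, colC_nil cn (by push_cast at hbase; omega), stB_single hcell0.2]
        simp only [wrC]
        rw [setC_self hk hcell0.1]
      · rw [colC_nil cn hk, stB_nil]
        rfl
    · have hklen : k + 1 < g.length := by push_cast at hbase; omega
      have hk : k < g.length := by omega
      have hcell0 := hg k (by omega) hk
      have hcell1 := hg (k+1) (by omega) hklen
      have hcast1 : (k : Int) + 1 = ((k+1 : Nat) : Int) := by push_cast; ring
      have hcast2 : (k : Int) + 2 = ((k+2 : Nat) : Int) := by push_cast; ring
      rw [solveFuel_succ, if_neg hbase, hcast1, pyGet_row hklen]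
      simp only [Option.bind_some]
      rw [pyGet_cellC hklen hcell1.1]
      simp only [Option.bind_some]
      rcases hcell1.2 with hv1 | hv1 | hv1
      · -- grid[k+1][cn] = "."
        rw [if_neg (by rw [hv1]; decide), pyGet_row hk]
        simp only [Option.bind_some]
        rw [pyGet_cellC hk hcell0.1]
        simp only [Option.bind_some]
        rcases hcell0.2 with hv0 | hv0 | hv0
        · rw [if_pos (Or.inl hv0),
              ih g (k+1) cn (GoodC_mono (by omega) hg) (by omega),
              colC_cons cn hk, hv0, stB_dot_cons]
          have hset0 : setC g k cn (cellC g k cn) = g := setC_self hk hcell0.1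
          simp only [wrC]
          rw [hv0] at hset0
          rw [hset0]
        · rw [if_pos (Or.inr hv0),
              ih g (k+1) cn (GoodC_mono (by omega) hg) (by omega),
              colC_cons cn hk, hv0, stB_hash_cons]
          have hset0 : setC g k cn (cellC g k cn) = g := setC_self hk hcell0.1
          simp only [wrC]
          rw [hv0] at hset0
          rw [hset0]
        · -- an apple over a gap: it moves down one row
          rw [if_neg (by rw [hv0]; decide), if_neg (by rw [hv1]; decide)]
          simp only [Option.bind_some]
          rw [pyGet_row hklen]
          simp only [Option.bind_some]
          rw [pyGet_cellC hklen hcell1.1]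
          simp only [Option.bind_some]
          rw [if_neg (by rw [hv1]; decide), if_pos hv1, pyGet_row hk]
          simp only [Option.bind_some]
          rw [PySem.List.pySet?_natCast _ cn _ hcell0.1]
          simp only [Option.bind_some]
          rw [PySem.List.pySet?_natCast _ cn _ hcell1.1]
          simp only [Option.bind_some]
          have hsetC : PySem.List.pySetD (PySem.List.pySetD g (k : Int) ((g.getD k []).set cn "."))
                (((k+1 : Nat) : Int)) ((g.getD (k+1) []).set cn "a")
              = setC (setC g k cn ".") (k+1) cn "a" := by
            rw [PySem.List.pySetD_natCast, PySem.List.pySetD_natCast]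
            show (setC g k cn ".").set (k+1) ((g.getD (k+1) []).set cn "a") = _
            unfold setC
            rw [rowD_set_ne (by omega)]
          rw [hsetC]
          have hG3good : GoodC (setC (setC g k cn ".") (k+1) cn "a") (k+1) cn :=
            GoodC_mono (by omega)
              (GoodC_setC (by simp [okv]) (GoodC_setC (by simp [okv]) hg))
          rw [ih _ (k+1) cn hG3good (by rw [length_setC, length_setC]; omega)]
          have hccol : colC (setC (setC g k cn ".") (k+1) cn "a") (k+1) cn
              = "a" :: colC g (k+2) cn := by
            rw [colC_cons cn (by rw [length_setC, length_setC]; omega)]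
            congr 1
            · exact cellC_setC_self (by rw [length_setC]; omega)
                (by rw [getD_setC_ne (by omega)]; exact hcell1.1)
            · rw [colC_setC_lt (by omega), colC_setC_lt (by omega)]
          rw [hccol, colC_cons cn hk, hv0, colC_cons cn hklen, hv1, stB_a_swap]
          simp only [wrC]
          rw [wrC_absorb (stB_ne_nil (by simp)) _ _ _ _]
      · -- grid[k+1][cn] = "#": skip two rows
        rw [if_pos hv1, hcast2,
            ih g (k+2) cn (GoodC_mono (by omega) hg) (by omega),
            colC_cons cn hk, colC_cons cn hklen, hv1, stB_two hcell0.2]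
        have hset1 : setC g (k+1) cn "#" = g := by
          rw [← hv1]
          exact setC_self hklen hcell1.1
        simp only [wrC]
        rw [setC_self hk hcell0.1, hset1]
      · -- grid[k+1][cn] = "a"
        rw [if_neg (by rw [hv1]; decide), pyGet_row hk]
        simp only [Option.bind_some]
        rw [pyGet_cellC hk hcell0.1]
        simp only [Option.bind_some]
        rcases hcell0.2 with hv0 | hv0 | hv0
        · rw [if_pos (Or.inl hv0),
              ih g (k+1) cn (GoodC_mono (by omega) hg) (by omega),
              colC_cons cn hk, hv0, stB_dot_cons]
          have hset0 : setC g k cn (cellC g k cn) = g := setC_self hk hcell0.1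
          simp only [wrC]
          rw [hv0] at hset0
          rw [hset0]
        · rw [if_pos (Or.inr hv0),
              ih g (k+1) cn (GoodC_mono (by omega) hg) (by omega),
              colC_cons cn hk, hv0, stB_hash_cons]
          have hset0 : setC g k cn (cellC g k cn) = g := setC_self hk hcell0.1
          simp only [wrC]
          rw [hv0] at hset0
          rw [hset0]
        · -- an apple over an apple: Python first settles the pile below (g2), then re-reads
          rw [if_neg (by rw [hv0]; decide), if_pos hv1,
              ih g (k+1) cn (GoodC_mono (by omega) hg) (by omega)]
          have hcol1 : colC g (k+1) cn = "a" :: colC g (k+2) cn := by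
            rw [colC_cons cn hklen, hv1]
          rw [hcol1]
          simp only [Option.bind_some]
          obtain ⟨w1, t', hL, hw1⟩ := stB_head (colC g (k+2) cn) (v1 := "a") (by decide)
          have hLmem : ∀ x ∈ stB [] ("a" :: colC g (k+2) cn), okv x := fun x hx => stB_mem hx
          have hLlen : (stB [] ("a" :: colC g (k+2) cn)).length = g.length - (k+1) := by
            rw [stB_len]
            simp [colC_len]
            omega
          have ht'len : t'.length = g.length - (k+2) := by
            have hy := stB_len ("a" :: colC g (k+2) cn) []
            rw [hL] at hy
            simp [colC_len] at hy
            omega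
          have hG2len : (wrC g (k+1) cn (stB [] ("a" :: colC g (k+2) cn))).length = g.length :=
            length_wrC _ _ _ _
          have hG2good : GoodC (wrC g (k+1) cn (stB [] ("a" :: colC g (k+2) cn))) k cn :=
            GoodC_wrC _ g (k+1) k cn hLmem hg
          have hG2col : colC (wrC g (k+1) cn (stB [] ("a" :: colC g (k+2) cn))) (k+1) cn
              = stB [] ("a" :: colC g (k+2) cn) :=
            colC_wrC _ g (k+1) cn (WideC_mono (by omega) (GoodC_wide hg)) hLlen
          have hG2cell : cellC (wrC g (k+1) cn (stB [] ("a" :: colC g (k+2) cn))) (k+1) cn :: 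
              colC (wrC g (k+1) cn (stB [] ("a" :: colC g (k+2) cn))) (k+2) cn = w1 :: t' := by
            rw [← colC_cons cn (by rw [hG2len]; omega), hG2col]
            exact hL
          have hG2c1 : cellC (wrC g (k+1) cn (stB [] ("a" :: colC g (k+2) cn))) (k+1) cn = w1 :=
            ((List.cons.injEq _ _ _ _).mp hG2cell).1
          have hG2c2 : colC (wrC g (k+1) cn (stB [] ("a" :: colC g (k+2) cn))) (k+2) cn = t' :=
            ((List.cons.injEq _ _ _ _).mp hG2cell).2
          have hG2wide : cn < ((wrC g (k+1) cn (stB [] ("a" :: colC g (k+2) cn))).getD (k+1) []).length :=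
            (hG2good (k+1) (by omega) (by rw [hG2len]; omega)).1
          rw [pyGet_row (by rw [hG2len]; omega)]
          simp only [Option.bind_some]
          rw [pyGet_cellC (by rw [hG2len]; omega) hG2wide, hG2c1]
          simp only [Option.bind_some]
          rcases hw1 with hwd | hwa
          · -- the settled pile leaves a gap on top: the apple falls into it
            rw [if_neg (by rw [hwd]; decide), if_pos hwd, pyGet_row (by rw [hG2len]; omega)]
            simp only [Option.bind_some]
            rw [PySem.List.pySet?_natCast _ cn _ (hG2good k (by omega) (by rw [hG2len]; omega)).1]
            simp only [Option.bind_some]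
            rw [PySem.List.pySet?_natCast _ cn _ hG2wide]
            simp only [Option.bind_some]
            subst hwd
            have hsetC : PySem.List.pySetD
                  (PySem.List.pySetD (wrC g (k+1) cn (stB [] ("a" :: colC g (k+2) cn))) (k : Int)
                    (((wrC g (k+1) cn (stB [] ("a" :: colC g (k+2) cn))).getD k []).set cn "."))
                  (((k+1 : Nat) : Int))
                  (((wrC g (k+1) cn (stB [] ("a" :: colC g (k+2) cn))).getD (k+1) []).set cn "a")
                = setC (setC (wrC g (k+1) cn (stB [] ("a" :: colC g (k+2) cn))) k cn ".") (k+1) cn "a" := by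
              rw [PySem.List.pySetD_natCast, PySem.List.pySetD_natCast]
              show (setC (wrC g (k+1) cn (stB [] ("a" :: colC g (k+2) cn))) k cn ".").set (k+1)
                  (((wrC g (k+1) cn (stB [] ("a" :: colC g (k+2) cn))).getD (k+1) []).set cn "a") = _
              unfold setC
              rw [rowD_set_ne (by omega)]
            rw [hsetC]
            have hG3good : GoodC (setC (setC (wrC g (k+1) cn (stB [] ("a" :: colC g (k+2) cn))) k cn ".")
                (k+1) cn "a") (k+1) cn :=
              GoodC_mono (by omega)
                (GoodC_setC (by simp [okv]) (GoodC_setC (by simp [okv]) hG2good))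
            rw [ih _ (k+1) cn hG3good (by rw [length_setC, length_setC, hG2len]; omega)]
            have hcolG3 : colC (setC (setC (wrC g (k+1) cn (stB [] ("a" :: colC g (k+2) cn))) k cn ".")
                (k+1) cn "a") (k+1) cn = "a" :: t' := by
              rw [colC_cons cn (by rw [length_setC, length_setC, hG2len]; omega)]
              congr 1
              · exact cellC_setC_self (by rw [length_setC, hG2len]; omega)
                  (by rw [getD_setC_ne (by omega)]; exact hG2wide)
              · rw [colC_setC_lt (by omega), colC_setC_lt (by omega)]
                exact hG2c2
            rw [hcolG3, colC_cons cn hk, hv0, hcol1, stB_a_dot (by decide) hL]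
            simp only [wrC]
            rw [wrC_absorb (stB_ne_nil (by simp)) _ _ _ _]
            rw [← wrC_setC_comm (stB [] ("a" :: colC g (k+2) cn)) g k (k+1) cn "." (by omega)]
            rw [wrC_overwrite _ (stB [] ("a" :: colC g (k+2) cn)) _ _ _
              (by rw [hLlen, stB_len]; simp [ht'len]; omega)]
          · -- the settled pile is all apples up to the top: nothing moves
            rw [if_pos hwa]
            subst hwa
            rw [colC_cons cn hk, hv0, hcol1, stB_a_a (by decide) hL]
            have hset0 : setC g k cn "a" = g := by
              rw [← hv0]
              exact setC_self hk hcell0.1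
            simp only [wrC]
            rw [hset0, hL]
            simp only [wrC]

-- ================= PORT B = settled column, written back =================
lemma foldB_spec (l : List String) : ∀ out seg,
    (l.foldl (fun (acc : List String × List String) cell =>
        if cell = "#" then
          (acc.1 ++ List.replicate (acc.2.length - acc.2.count "a") "."
                 ++ List.replicate (acc.2.count "a") "a" ++ ["#"], [])
        else (acc.1, acc.2 ++ [cell])) (out, seg)).1
      ++ List.replicate ((l.foldl (fun (acc : List String × List String) cell =>
        if cell = "#" then
          (acc.1 ++ List.replicate (acc.2.length - acc.2.count "a") "."
                 ++ List.replicate (acc.2.count "a") "a" ++ ["#"], [])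
        else (acc.1, acc.2 ++ [cell])) (out, seg)).2.length
          - (l.foldl (fun (acc : List String × List String) cell =>
        if cell = "#" then
          (acc.1 ++ List.replicate (acc.2.length - acc.2.count "a") "."
                 ++ List.replicate (acc.2.count "a") "a" ++ ["#"], [])
        else (acc.1, acc.2 ++ [cell])) (out, seg)).2.count "a") "."
      ++ List.replicate ((l.foldl (fun (acc : List String × List String) cell =>
        if cell = "#" then
          (acc.1 ++ List.replicate (acc.2.length - acc.2.count "a") "."
                 ++ List.replicate (acc.2.count "a") "a" ++ ["#"], [])
        else (acc.1, acc.2 ++ [cell])) (out, seg)).2.count "a") "a"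
    = out ++ stB seg l := by
  induction l with
  | nil =>
    intro out seg
    simp only [List.foldl_nil, stB, pk]
    simp [List.append_assoc]
  | cons x xs ih =>
    intro out seg
    by_cases hx : x = "#"
    · simp only [List.foldl_cons, hx, ite_true]
      rw [ih (out ++ List.replicate (seg.length - seg.count "a") "."
            ++ List.replicate (seg.count "a") "a" ++ ["#"]) []]
      simp only [stB, pk, ite_true]
      simp [List.append_assoc]
    · simp only [List.foldl_cons, hx, ite_false]
      rw [ih out (seg ++ [x])]
      simp only [stB, hx, ite_false]

lemma wbB (vs : List String) (k cn : Nat) : ∀ (j : Nat) g,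
    (PySem.List.enumerate vs (j : Int)).foldl (fun g q =>
        PySem.List.pySetD g ((k : Int) + q.1)
          (PySem.List.pySetD (PySem.List.pyGetD g ((k : Int) + q.1) []) (cn : Int) q.2)) g =
      wrC g (k + j) cn vs := by
  induction vs with
  | nil => intro j g; simp [PySem.List.enumerate, wrC]
  | cons v vs ih =>
    intro j g
    rw [PySem.List.enumerate_cons]
    simp only [List.foldl_cons]
    have hcast : (k : Int) + (j : Int) = ((k + j : Nat) : Int) := by push_cast; ring
    have hstep : PySem.List.pySetD g ((k : Int) + (j : Int))
        (PySem.List.pySetD (PySem.List.pyGetD g ((k : Int) + (j : Int)) []) (cn : Int) v) =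
        setC g (k + j) cn v := by
      rw [hcast, PySem.List.pyGetD_natCast, PySem.List.pySetD_natCast, PySem.List.pySetD_natCast]
      rfl
    rw [hstep]
    have hcast2 : (j : Int) + 1 = ((j + 1 : Nat) : Int) := by push_cast; ring
    rw [hcast2, ih (j+1)]
    simp only [wrC]
    rw [show k + (j + 1) = (k + j) + 1 from by omega]

lemma altB {g : List (List String)} {k cn : Nat} (hlt : ¬ ((k : Int) ≥ (g.length : Int) - 1)) :
    solve_alt g (k : Int) (cn : Int) = wrC g k cn (stB [] (colC g k cn)) := by
  rw [solve_alt, if_neg hlt]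
  have hcol : (PySem.List.slice g (some (k : Int)) none).map
      (fun row => PySem.List.pyGetD row (cn : Int) "") = colC g k cn := by
    rw [PySem.List.slice_from_natCast]
    simp [colC, PySem.List.pyGetD_natCast]
  simp only [hcol]
  rw [foldB_spec (colC g k cn) [] []]
  simp only [List.nil_append]
  have hwb := wbB (stB [] (colC g k cn)) k cn 0 g
  simp only [Nat.cast_zero, Nat.add_zero] at hwb
  exact hwb

-- conversion of Pre_ to the index form
lemma pre_good {grid : List (List String)} {k cn : Nat}
    (hgood : ∀ row ∈ grid.drop k,
      (cn : Int) < (row.length : Int) ∧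
        (row.getD cn "" = "." ∨ row.getD cn "" = "#" ∨ row.getD cn "" = "a")) :
    GoodC grid k cn := by
  intro i hi hlen
  have hmem : grid.getD i [] ∈ grid.drop k := by
    rw [List.getD_eq_getElem grid [] hlen]
    have hdi : i - k < (grid.drop k).length := by simp; omega
    have : grid[i] = (grid.drop k)[i - k] := by
      rw [List.getElem_drop]
      congr 1
      omega
    rw [this]
    exact List.getElem_mem hdi
  have h := hgood _ hmem
  exact ⟨by exact_mod_cast h.1, h.2⟩

-- ===== VERDICT (by name: the statement is the Claim_ definition above) =====
theorem solve_spec : Claim_equal_solve := by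
  intro grid r c _ hpre
  show solve grid r c = solve_alt grid r c
  rcases hpre with hbig | ⟨hr, hc, hgood⟩
  · rw [solve, solveFuel_succ, if_pos hbig, solve_alt, if_pos hbig]
    rfl
  · obtain ⟨k, rfl⟩ : ∃ k : Nat, r = (k : Int) := ⟨r.toNat, (Int.toNat_of_nonneg hr).symm⟩
    obtain ⟨cn, rfl⟩ : ∃ m : Nat, c = (m : Int) := ⟨c.toNat, (Int.toNat_of_nonneg hc).symm⟩
    simp only [Int.toNat_natCast] at hgood
    by_cases hbig : (k : Int) ≥ (grid.length : Int) - 1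
    · rw [solve, solveFuel_succ, if_pos hbig, solve_alt, if_pos hbig]
      rfl
    · have hGood : GoodC grid k cn := pre_good hgood
      have hk : k < grid.length := by push_cast at hbig; omega
      have hf : ((grid.length : Int) - (k : Int)).toNat = grid.length - k := by omega
      rw [solve, hf, mainA (grid.length - k) grid k cn hGood (by omega), altB hbig]
      rfl
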